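-- pv_equiv track=rewrite | github.com/TinDang97/its-camera-ai | its-camera-ai/src/its_camera_ai/ml/ocr_engine.py | _apply_contextual_fixes
-- ===== SOURCE A (Python) =====
-- def _apply_contextual_fixes(text: str, replacements: dict[str, str]) -> str:
--     """Apply OCR fixes based on context."""
--     # Simple heuristic: letters usually at start/end, numbers in middle
--     result = ""
--
--     for i, char in enumerate(text):
--         if char in replacements:
--             # First and last positions are usually letters
--             if i == 0 or i == len(text) - 1:
--                 if char in "01":
--                     result += "O" if char == "0" else "I"
--                 else:
--                     result += char
--             else:
--                 result += char
--         else: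
--             result += char
--
--     return result
-- ===== SOURCE B (Python) =====
-- def _apply_contextual_fixes(text: str, replacements: dict[str, str]) -> str:
--     """Apply OCR fixes based on context (only the first/last char can change)."""
--     if not text:
--         return text
--
--     def fix(c: str) -> str:
--         if c in replacements and c in "01":
--             return "O" if c == "0" else "I"
--         return c
--
--     if len(text) == 1:
--         return fix(text)
--     return fix(text[0]) + text[1:-1] + fix(text[-1])
-- ===== Notes on version B (the rewrite author's own statement) =====
-- stated objective: simpler
-- what changed: B replaces A's per-character indexed scan (with a dict membership test and string concatenation per character) by direct endpoint access: only text[0] and text[-1] can ever change, so B applies a small fix() to the two endpoints and passes the middle slice through unchanged.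
import Mathlib
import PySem

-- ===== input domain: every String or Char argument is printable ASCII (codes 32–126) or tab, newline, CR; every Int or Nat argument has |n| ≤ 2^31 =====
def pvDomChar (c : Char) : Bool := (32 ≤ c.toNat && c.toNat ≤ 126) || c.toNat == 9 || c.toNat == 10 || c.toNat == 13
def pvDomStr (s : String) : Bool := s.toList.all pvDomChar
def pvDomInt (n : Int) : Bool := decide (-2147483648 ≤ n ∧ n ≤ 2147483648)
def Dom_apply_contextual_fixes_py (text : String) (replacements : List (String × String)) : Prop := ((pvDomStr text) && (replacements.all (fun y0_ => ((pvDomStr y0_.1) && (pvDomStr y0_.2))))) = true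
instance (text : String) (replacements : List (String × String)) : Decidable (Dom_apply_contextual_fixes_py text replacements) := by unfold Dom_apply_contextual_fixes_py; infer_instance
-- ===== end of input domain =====

-- B changes only the two endpoint characters (a direct distillation of A's endpoint-only rule); same return value, no speed claim.
-- ===== PORT A =====
-- literal transliteration of A: fold over enumerate(text), appending one char per step
def apply_contextual_fixes_py (text : String) (replacements : List (String × String)) : String :=
  let chars := text.toList
  let result := (PySem.List.enumerate chars 0).foldl (fun (result : List Char) p =>
    let i := p.1
    let char := p.2
    if replacements.any (fun kv => kv.1 == String.ofList [char]) then
      if i == 0 || i == (chars.length : Int) - 1 then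
        if char == '0' || char == '1' then
          result ++ [if char == '0' then 'O' else 'I']
        else
          result ++ [char]
      else
        result ++ [char]
    else
      result ++ [char]) []
  String.ofList result

-- ===== PORT B =====
-- B's fix(c): replace '0'/'1' by 'O'/'I' when the char is a replacement key
def pvFixChar (replacements : List (String × String)) (c : Char) : Char :=
  if replacements.any (fun kv => kv.1 == String.ofList [c]) && (c == '0' || c == '1') then
    if c == '0' then 'O' else 'I'
  else c

-- literal transliteration of B: guard empty / single char, else fix(text[0]) + text[1:-1] + fix(text[-1])
def apply_contextual_fixes_py_alt (text : String) (replacements : List (String × String)) : String :=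
  match text.toList with
  | [] => text
  | [c] => String.ofList [pvFixChar replacements c]
  | c :: c2 :: rest =>
      String.ofList (pvFixChar replacements c ::
        ((c2 :: rest).dropLast ++ [pvFixChar replacements (rest.getLastD c2)]))

-- ===== PRECONDITION & SPEC =====
def Spec_apply_contextual_fixes_py (text : String) (replacements : List (String × String)) (out : String) : Prop := out = apply_contextual_fixes_py_alt text replacements
instance (text : String) (replacements : List (String × String)) (out : String) : Decidable (Spec_apply_contextual_fixes_py text replacements out) := by unfold Spec_apply_contextual_fixes_py; infer_instance

-- ===== CLAIM (what is proved, stated in full; the proofs are below) =====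
def Claim_equal_apply_contextual_fixes_py : Prop := ∀ (text : String) (replacements : List (String × String)), Dom_apply_contextual_fixes_py text replacements → Spec_apply_contextual_fixes_py text replacements (apply_contextual_fixes_py text replacements)

-- ===== LEMMAS AND PROOFS =====

-- ===== VERDICT (by name: the statement is the Claim_ definition above) =====
-- one fold step of A, as the single-character list it appends
def stepA (replacements : List (String × String)) (n : Int) (p : Int × Char) : List Char :=
  if replacements.any (fun kv => kv.1 == String.ofList [p.2]) then
    if p.1 == 0 || p.1 == (n : Int) - 1 then
      if p.2 == '0' || p.2 == '1' then [if p.2 == '0' then 'O' else 'I'] else [p.2]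
    else [p.2]
  else [p.2]

lemma stepA_eq (replacements : List (String × String)) (n i : Int) (c : Char) :
    stepA replacements n (i, c) = [if i = 0 ∨ i = n - 1 then pvFixChar replacements c else c] := by
  unfold stepA pvFixChar
  simp only [beq_iff_eq, Bool.or_eq_true, Bool.and_eq_true]
  split_ifs <;> simp_all

lemma getD_getLast?_cons {a : Type} (x : a) (l : List a) (d d' : a) :
    (x :: l).getLast?.getD d = (x :: l).getLast?.getD d' := by
  induction l generalizing x with
  | nil => simp
  | cons b l ih => simpa [List.getLast?_cons_cons] using ih b

lemma enum_flatMap_mid (replacements : List (String × String)) (n : Int) :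
    ∀ (xs : List Char) (x : Char) (s : Int), 0 < s → s + (x :: xs).length = n →
      (PySem.List.enumerate (x :: xs) s).flatMap (stepA replacements n)
      = (x :: xs).dropLast ++ [pvFixChar replacements (xs.getLastD x)] := by
  intro xs
  induction xs with
  | nil =>
    intro x s hs hn
    simp [PySem.List.enumerate_cons, PySem.List.enumerate_nil, stepA_eq]
    intro _ h2
    exact absurd (by simp at hn; omega) h2
  | cons y ys ih =>
    intro x s hs hn
    rw [PySem.List.enumerate_cons]
    simp only [List.flatMap_cons, stepA_eq]
    rw [ih y (s + 1) (by omega) (by simp at hn ⊢; omega)]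
    have h0 : ¬ (s = 0 ∨ s = n - 1) := by simp at hn; omega
    simp [h0]
    cases ys with
    | nil => simp
    | cons z zs =>
      simp only [List.getLast?_cons_cons]
      exact congrArg _ (getD_getLast?_cons z zs y x)

theorem apply_contextual_fixes_py_spec : Claim_equal_apply_contextual_fixes_py := by
  intro text replacements _
  unfold Spec_apply_contextual_fixes_py apply_contextual_fixes_py apply_contextual_fixes_py_alt
  have hfold : ∀ (l : List (Int × Char)) (acc : List Char),
      l.foldl (fun (result : List Char) p =>
        if replacements.any (fun kv => kv.1 == String.ofList [p.2]) then
          if p.1 == 0 || p.1 == (text.toList.length : Int) - 1 then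
            if p.2 == '0' || p.2 == '1' then
              result ++ [if p.2 == '0' then 'O' else 'I']
            else result ++ [p.2]
          else result ++ [p.2]
        else result ++ [p.2]) acc
      = acc ++ l.flatMap (stepA replacements (text.toList.length : Int)) := by
    intro l
    induction l with
    | nil => intro acc; simp
    | cons p ps ih =>
      intro acc
      simp only [List.foldl_cons, List.flatMap_cons, ih]
      unfold stepA
      split_ifs <;> simp
  simp only [hfold, List.nil_append]
  cases htl : text.toList with
  | nil =>
    simp [PySem.List.enumerate_nil]
    have := congrArg String.ofList htl
    rwa [String.ofList_toList] at this
  | cons c tl =>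
    cases tl with
    | nil =>
      simp [PySem.List.enumerate_cons, PySem.List.enumerate_nil, stepA_eq]
    | cons c2 rest =>
      rw [PySem.List.enumerate_cons, List.flatMap_cons]
      have h01 : ((0:Int) + 1) = 1 := by norm_num
      rw [h01, enum_flatMap_mid replacements ((c :: c2 :: rest).length : Int) rest c2 1
        (by omega) (by push_cast [List.length_cons]; omega)]
      simp [stepA_eq]
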